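-- pv_equiv track=rewrite | github.com/ArsenMiq/ACA | userActiveMinutes.py | findUAM
-- ===== SOURCE A (Python) =====
-- def findUAM(logs, k):
--     mapDict = {}
--     for i in range(len(logs)):
--         if logs[i][0] in mapDict:
--             if logs[i][1] in mapDict[logs[i][0]]:
--                 continue
--             else:
--                 mapDict[logs[i][0]].append(logs[i][1])
--         else:
--             mapDict[logs[i][0]] = [logs[i][1]]
--
--     result = [0 for i in range(k)]
--
--     for i in mapDict:
--         result[len(mapDict[i]) - 1] += 1
--     return result
-- ===== SOURCE B (Python) =====
-- def findUAM(logs, k):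
--     # Sort-then-scan: after sorting all (user, minute) pairs lexicographically,
--     # duplicate pairs and equal users are adjacent, so one linear scan counts
--     # distinct minutes per user-run and tallies at each run boundary.
--     pairs = sorted([(e[0], e[1]) for e in logs])
--     result = [0] * k
--     cnt = 0
--     prev = None
--     for p in pairs:
--         if prev is not None and p[0] != prev[0]:
--             result[cnt - 1] += 1
--             cnt = 0
--         if p != prev:
--             cnt += 1
--         prev = p
--     if prev is not None:
--         result[cnt - 1] += 1
--     return result
-- ===== Notes on version B (the rewrite author's own statement) =====
-- stated objective: alternative
-- what changed: Replaces A's incremental dict-of-lists with linear membership scans by a sort-then-scan algorithm: sort all (user, minute) pairs lexicographically, then one linear scan over the sorted list counts distinct pairs per adjacent user-run and tallies at run boundaries; no dict, set or membership test remains.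
import Mathlib
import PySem

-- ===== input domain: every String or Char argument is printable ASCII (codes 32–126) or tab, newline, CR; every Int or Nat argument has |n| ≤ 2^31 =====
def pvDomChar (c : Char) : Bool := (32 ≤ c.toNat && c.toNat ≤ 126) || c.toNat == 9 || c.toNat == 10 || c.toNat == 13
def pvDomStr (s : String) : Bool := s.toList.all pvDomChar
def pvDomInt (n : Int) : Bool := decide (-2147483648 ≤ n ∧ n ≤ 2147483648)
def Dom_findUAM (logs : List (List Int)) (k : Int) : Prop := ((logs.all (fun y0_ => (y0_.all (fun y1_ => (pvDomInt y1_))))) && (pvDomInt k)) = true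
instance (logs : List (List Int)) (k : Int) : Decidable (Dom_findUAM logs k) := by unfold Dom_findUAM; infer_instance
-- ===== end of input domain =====

-- B replaces A's incremental dict-of-lists (linear membership scan per entry) by sort-then-scan:
-- sort all (user, minute) pairs lexicographically, then one linear scan counts distinct pairs per
-- adjacent user-run and tallies at run boundaries (alternative algorithm, no dict/set remains).


-- ===== PORT A =====
-- A-side helper: the body of A's first loop for one entry.
-- 'entry[0]' / 'entry[1]' are ported as pyGetD with default 0: exact whenever the row has
-- length ≥ 2 (Pre_ below; Python raises IndexError otherwise).
def pvStepA (d : PySem.Dict Int (List Int)) (e : List Int) : PySem.Dict Int (List Int) :=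
  let u := PySem.List.pyGetD e 0 0
  let m := PySem.List.pyGetD e 1 0
  if d.contains u then
    if m ∈ d.getD u [] then d
    else d.insert u (d.getD u [] ++ [m])
  else d.insert u [m]

-- 'for i in range(len(logs)): … logs[i] …' visits exactly the entries of logs in order, so it is
-- ported as a fold over logs.  'result[n-1] += 1' is ported as List.set at index (n-1).toNat:
-- exact whenever 1 ≤ n ≤ k (Pre_ below; Python raises IndexError otherwise).
def findUAM (logs : List (List Int)) (k : Int) : List Int :=
  let mapDict : PySem.Dict Int (List Int) := logs.foldl pvStepA PySem.Dict.empty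
  let result : List Int := (PySem.List.pyRange 0 k 1).map (fun _ => (0 : Int))
  mapDict.keys.foldl (fun r u =>
    let n : Int := ((mapDict.getD u []).length : Int)
    r.set (n - 1).toNat (r.getD (n - 1).toNat 0 + 1)) result

-- ===== PORT B =====
-- B-side helper: 'result[cnt - 1] += 1' (same List.set/getD convention as in port A, exact on Pre_).
def pvIncr (r : List Int) (c : Int) : List Int :=
  r.set (c - 1).toNat (r.getD (c - 1).toNat 0 + 1)

-- B-side helper: the body of Source B's scan loop, state = (result, cnt, prev).
def pvStepB (st : List Int × Int × Option (Int × Int)) (p : Int × Int) :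
    List Int × Int × Option (Int × Int) :=
  let fl : List Int × Int :=
    match st.2.2 with
    | some q => if p.1 ≠ q.1 then (pvIncr st.1 st.2.1, 0) else (st.1, st.2.1)
    | none => (st.1, st.2.1)
  let cnt : Int := if some p ≠ st.2.2 then fl.2 + 1 else fl.2
  (fl.1, cnt, some p)

-- 'sorted(pairs)' on 2-tuples is Python's lexicographic sort: PySem.List.sorted2 with the two
-- projections as keys.  '[0]*k' is List.replicate k.toNat 0.
def findUAM_alt (logs : List (List Int)) (k : Int) : List Int :=
  let pairs : List (Int × Int) :=
    PySem.List.sorted2 (logs.map (fun e => (PySem.List.pyGetD e 0 0, PySem.List.pyGetD e 1 0)))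
      (fun p => p.1) (fun p => p.2)
  let st := pairs.foldl pvStepB (List.replicate k.toNat 0, 0, none)
  match st.2.2 with
  | some _ => pvIncr st.1 st.2.1
  | none => st.1

-- ===== PRECONDITION & SPEC =====
-- Pre_ excludes exactly the inputs on which the Python A raises IndexError: a row with fewer than
-- two fields (logs[i][1] fails), or a user whose number of distinct (user, minute) pairs exceeds k
-- (result[n-1] fails).  B raises IndexError on the same inputs.
def Pre_findUAM (logs : List (List Int)) (k : Int) : Prop :=
  (∀ e ∈ logs, 2 ≤ e.length) ∧
  (∀ e ∈ logs,
    (((PySem.List.dedup (logs.map (fun r => (PySem.List.pyGetD r 0 0, PySem.List.pyGetD r 1 0)))).countP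
        (fun p => p.1 = PySem.List.pyGetD e 0 0) : Int) ≤ k))
instance (logs : List (List Int)) (k : Int) : Decidable (Pre_findUAM logs k) := by
  unfold Pre_findUAM; infer_instance
def pvWitness_findUAM : List (List Int) × Int := ([[1, 5], [2, 5], [1, 5], [1, 7]], 3)

def Spec_findUAM (logs : List (List Int)) (k : Int) (out : List Int) : Prop := out = findUAM_alt logs k
instance (logs : List (List Int)) (k : Int) (out : List Int) : Decidable (Spec_findUAM logs k out) := by unfold Spec_findUAM; infer_instance

-- ===== CLAIM (what is proved, stated in full; the proofs are below) =====
def Claim_equal_findUAM : Prop := ∀ (logs : List (List Int)) (k : Int), Dom_findUAM logs k → Pre_findUAM logs k → Spec_findUAM logs k (findUAM logs k)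

-- ===== LEMMAS AND PROOFS =====

-- ---- generic fact about pvIncr: two increments commute ----

theorem pv_incr_comm (r : List Int) (a b : Int) :
    pvIncr (pvIncr r a) b = pvIncr (pvIncr r b) a := by
  unfold pvIncr
  rcases eq_or_ne (a - 1).toNat (b - 1).toNat with h | h
  · rw [h]
  · apply List.ext_getElem?
    intro n
    simp [List.getElem?_set, List.getD, List.length_set]
    split_ifs <;> simp_all

-- ---- A-side characterisation ----

-- proof-side helper: adding one entry's (user, minute) pair to a set (used to run A's loop
-- side by side with a set of pairs).
def pvAddPair (s : PySem.Set (Int × Int)) (e : List Int) : PySem.Set (Int × Int) :=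
  PySem.Set.add s (PySem.List.pyGetD e 0 0, PySem.List.pyGetD e 1 0)

-- Invariant of A's first loop: A's dict has exactly the users of the pair set as keys (in
-- first-occurrence order), and maps each user to the minutes of its pairs in order.
theorem pv_inv (L : List (List Int)) (d : PySem.Dict Int (List Int)) (S : PySem.Set (Int × Int))
    (hk : d.keys = PySem.Set.ofList (S.map Prod.fst))
    (hg : ∀ u : Int, d.getD u [] = (S.filter (fun p => p.1 == u)).map Prod.snd) :
    (L.foldl pvStepA d).keys = PySem.Set.ofList ((L.foldl pvAddPair S).map Prod.fst) ∧
    ∀ u : Int, (L.foldl pvStepA d).getD u []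
        = ((L.foldl pvAddPair S).filter (fun p => p.1 == u)).map Prod.snd := by
  induction L generalizing d S with
  | nil => exact ⟨hk, hg⟩
  | cons e L ih =>
    rw [List.foldl_cons, List.foldl_cons]
    by_cases hmem : (PySem.List.pyGetD e 0 0, PySem.List.pyGetD e 1 0) ∈ S
    · -- the pair was seen before: both states are unchanged
      have hadd : pvAddPair S e = S := by
        simp [pvAddPair, PySem.Set.add, PySem.Set.contains, hmem]
      have hcont : d.contains (PySem.List.pyGetD e 0 0) = true := by
        refine (PySem.Dict.contains_iff_mem_keys d _).2 ?_
        rw [hk]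
        exact (PySem.Set.mem_ofList _ _).2 (List.mem_map_of_mem hmem)
      have hmm : PySem.List.pyGetD e 1 0 ∈ d.getD (PySem.List.pyGetD e 0 0) [] := by
        rw [hg]
        exact List.mem_map_of_mem (List.mem_filter.2 ⟨hmem, by simp⟩)
      have hstepA : pvStepA d e = d := by simp [pvStepA, hcont, hmm]
      rw [hstepA, hadd]
      exact ih d S hk hg
    · -- a new pair: it is appended to the set
      have hadd : pvAddPair S e = S ++ [(PySem.List.pyGetD e 0 0, PySem.List.pyGetD e 1 0)] := by
        simp [pvAddPair, PySem.Set.add, PySem.Set.contains, hmem]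
      rw [hadd]
      by_cases hcont : d.contains (PySem.List.pyGetD e 0 0) = true
      · -- known user, new minute: A appends the minute to the user's list
        have hnm : PySem.List.pyGetD e 1 0 ∉ d.getD (PySem.List.pyGetD e 0 0) [] := by
          rw [hg]
          intro h
          obtain ⟨p, hpF, hsnd⟩ := List.mem_map.1 h
          obtain ⟨hpS, hpu⟩ := List.mem_filter.1 hpF
          apply hmem
          have hp1 : p.1 = PySem.List.pyGetD e 0 0 := by simpa using hpu
          have : p = (PySem.List.pyGetD e 0 0, PySem.List.pyGetD e 1 0) := by
            cases p; simp_all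
          exact this ▸ hpS
        have hstepA : pvStepA d e
            = d.insert (PySem.List.pyGetD e 0 0)
                (d.getD (PySem.List.pyGetD e 0 0) [] ++ [PySem.List.pyGetD e 1 0]) := by
          simp [pvStepA, hcont, hnm]
        rw [hstepA]
        refine ih _ _ ?_ ?_
        · rw [PySem.Dict.keys_insert_of_contains d _ hcont, hk, List.map_append]
          have hu : PySem.List.pyGetD e 0 0 ∈ PySem.Set.ofList (S.map Prod.fst) := by
            rw [← hk]; exact (PySem.Dict.contains_iff_mem_keys d _).1 hcont
          simp [PySem.Set.ofList_append_singleton, PySem.Set.add, PySem.Set.contains, hu]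
        · intro u'
          by_cases hu' : u' = PySem.List.pyGetD e 0 0
          · subst hu'
            rw [PySem.Dict.getD_insert, if_pos rfl, List.filter_append, List.map_append, hg]
            simp
          · rw [PySem.Dict.getD_insert, if_neg hu', List.filter_append, List.map_append, hg]
            have hfalse : (PySem.List.pyGetD e 0 0 == u') = false := by
              simpa using fun h : PySem.List.pyGetD e 0 0 = u' => hu' h.symm
            simp [hfalse]
      · -- new user: A inserts a fresh one-minute list
        have hcontF : d.contains (PySem.List.pyGetD e 0 0) = false := by
          simpa using hcont
        have hstepA : pvStepA d e = d.insert (PySem.List.pyGetD e 0 0) [PySem.List.pyGetD e 1 0] := by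
          simp [pvStepA, hcontF]
        have hfilter : S.filter (fun p => p.1 == PySem.List.pyGetD e 0 0) = [] := by
          have h0 := hg (PySem.List.pyGetD e 0 0)
          rw [PySem.Dict.getD_of_not_contains d [] hcontF] at h0
          exact List.map_eq_nil_iff.1 h0.symm
        rw [hstepA]
        refine ih _ _ ?_ ?_
        · rw [PySem.Dict.keys_insert_of_not_contains d _ hcontF, hk, List.map_append]
          have hu : PySem.List.pyGetD e 0 0 ∉ PySem.Set.ofList (S.map Prod.fst) := by
            rw [← hk]
            intro h
            have := (PySem.Dict.contains_iff_mem_keys d _).2 h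
            simp [hcontF] at this
          simp [PySem.Set.ofList_append_singleton, PySem.Set.add, PySem.Set.contains, hu]
        · intro u'
          by_cases hu' : u' = PySem.List.pyGetD e 0 0
          · subst hu'
            rw [PySem.Dict.getD_insert, if_pos rfl, List.filter_append, List.map_append, hfilter]
            simp
          · rw [PySem.Dict.getD_insert, if_neg hu', List.filter_append, List.map_append, hg]
            have hfalse : (PySem.List.pyGetD e 0 0 == u') = false := by
              simpa using fun h : PySem.List.pyGetD e 0 0 = u' => hu' h.symm
            simp [hfalse]

-- A user's distinct-minute list in A's dict has as length the multiplicity of that user among the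
-- first components of the pair set.
theorem pv_count (P : List (Int × Int)) (u : Int) :
    ((P.filter (fun p => p.1 == u)).map Prod.snd).length = List.count u (P.map Prod.fst) := by
  rw [List.length_map, List.count, List.countP_map, List.countP_eq_length_filter]
  rfl

theorem pv_init (k : Int) :
    (PySem.List.pyRange 0 k 1).map (fun _ => (0 : Int)) = List.replicate k.toNat 0 := by
  simp [List.map_const', PySem.List.length_pyRange_one]

-- ---- B-side: order facts about the lexicographic insertion sort ----

-- the strict lexicographic comparison sorted2 sorts by (definitionally its 'lt')
def pvLexLt (a b : Int × Int) : Bool :=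
  decide (a.1 < b.1) || (!decide (b.1 < a.1) && decide (a.2 < b.2))

-- lexicographic ≤ as a Prop (the negation of pvLexLt the other way round)
def pvLexLe (a b : Int × Int) : Prop := a.1 < b.1 ∨ (a.1 = b.1 ∧ a.2 ≤ b.2)
-- strict lexicographic < as a Prop
def pvLexLtP (a b : Int × Int) : Prop := a.1 < b.1 ∨ (a.1 = b.1 ∧ a.2 < b.2)

theorem pv_lexlt_false_iff (a b : Int × Int) : pvLexLt b a = false ↔ pvLexLe a b := by
  simp [pvLexLt, pvLexLe]; omega

-- ---- B-side: run structure of the scan ----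

-- adjacent deduplication (proof-side; mirrors the 'p != prev' skips of the scan)
def pvDed : (Int × Int) → List (Int × Int) → List (Int × Int)
  | _, [] => []
  | q, p :: s => if p = q then pvDed q s else p :: pvDed p s

-- the list of counts the scan flushes, in order (proof-side description of Source B's loop)
def pvCnts : Option (Int × Int) → Int → List (Int × Int) → List Int
  | none, _, [] => []
  | some _, cnt, [] => [cnt]
  | none, cnt, p :: s => pvCnts (some p) (cnt + 1) s
  | some q, cnt, p :: s =>
      if p.1 ≠ q.1 then cnt :: pvCnts (some p) 1 s
      else if p ≠ q then pvCnts (some p) (cnt + 1) s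
      else pvCnts (some p) cnt s

-- the tally of a list of users, user by user: first user's multiplicity, then the rest
def pvTally : List Int → List Int
  | [] => []
  | a :: G => (1 + (G.count a : Int)) :: pvTally (G.filter (fun v => v ≠ a))
  termination_by G => G.length
  decreasing_by
    simp only [List.length_cons, Nat.lt_succ_iff, List.length_unattach]
    exact le_trans (List.length_filter_le _ _) (le_of_eq List.length_attach)

-- the distinct users, in first-occurrence order (proof-side twin of pvTally)
def pvNod : List Int → List Int
  | [] => []
  | a :: G => a :: pvNod (G.filter (fun v => v ≠ a))
  termination_by G => G.length
  decreasing_by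
    simp only [List.length_cons, Nat.lt_succ_iff, List.length_unattach]
    exact le_trans (List.length_filter_le _ _) (le_of_eq List.length_attach)

theorem pv_pairwise_insertBy (x : Int × Int) (ys : List (Int × Int))
    (h : ys.Pairwise pvLexLe) : (PySem.List.insertBy pvLexLt x ys).Pairwise pvLexLe := by
  induction ys with
  | nil => simp [PySem.List.insertBy]
  | cons y ys ih =>
    rw [List.pairwise_cons] at h
    obtain ⟨hy, hys⟩ := h
    show (if pvLexLt x y then x :: y :: ys else y :: PySem.List.insertBy pvLexLt x ys).Pairwise pvLexLe
    split_ifs with hxy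
    · refine List.pairwise_cons.2 ⟨?_, List.pairwise_cons.2 ⟨hy, hys⟩⟩
      intro z hz
      rcases List.mem_cons.1 hz with rfl | hz
      · revert hxy; simp [pvLexLt, pvLexLe]; omega
      · have := hy z hz
        revert hxy this; simp [pvLexLt, pvLexLe]; omega
    · refine List.pairwise_cons.2 ⟨?_, ih hys⟩
      intro z hz
      rcases (PySem.List.mem_insertBy _ _ _ _).1 hz with rfl | hz
      · exact (pv_lexlt_false_iff y z).1 (by simpa using hxy)
      · exact hy z hz

theorem pv_sorted2_pairwise (xs : List (Int × Int)) :
    (PySem.List.sorted2 xs (fun p => p.1) (fun p => p.2)).Pairwise pvLexLe := by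
  show (xs.foldl (fun acc x => PySem.List.insertBy pvLexLt x acc) []).Pairwise pvLexLe
  generalize hacc : ([] : List (Int × Int)) = acc
  have h : acc.Pairwise pvLexLe := by rw [← hacc]; simp
  clear hacc
  induction xs generalizing acc with
  | nil => exact h
  | cons x xs ih => exact ih _ (pv_pairwise_insertBy x acc h)

theorem pv_scan_eq_foldl (S : List (Int × Int)) (r : List Int) (cnt : Int)
    (prev : Option (Int × Int)) :
    (match (S.foldl pvStepB (r, cnt, prev)).2.2 with
      | some _ => pvIncr (S.foldl pvStepB (r, cnt, prev)).1 (S.foldl pvStepB (r, cnt, prev)).2.1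
      | none => (S.foldl pvStepB (r, cnt, prev)).1)
    = (pvCnts prev cnt S).foldl pvIncr r := by
  induction S generalizing r cnt prev with
  | nil => cases prev <;> simp [pvCnts]
  | cons p S ih =>
    rw [List.foldl_cons]
    cases prev with
    | none =>
      have hstep : pvStepB (r, cnt, none) p = (r, cnt + 1, some p) := by
        simp [pvStepB]
      rw [hstep, ih]
      rfl
    | some q =>
      by_cases h1 : p.1 = q.1
      · by_cases h2 : p = q
        · have hstep : pvStepB (r, cnt, some q) p = (r, cnt, some p) := by
            simp [pvStepB, h2]
          rw [hstep, ih]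
          simp [pvCnts, h1, h2]
        · have hstep : pvStepB (r, cnt, some q) p = (r, cnt + 1, some p) := by
            simp [pvStepB, h1, h2]
          rw [hstep, ih]
          simp [pvCnts, h1, h2]
      · have hstep : pvStepB (r, cnt, some q) p = (pvIncr r cnt, 1, some p) := by
          simp [pvStepB, h1]
          intro h; exact absurd (congrArg Prod.fst h) h1
        rw [hstep, ih]
        simp [pvCnts, h1]

theorem pv_cnts_ded (S : List (Int × Int)) (q : Int × Int) (cnt : Int) :
    pvCnts (some q) cnt S = pvCnts (some q) cnt (pvDed q S) := by
  induction S generalizing q cnt with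
  | nil => rfl
  | cons p S ih =>
    by_cases h2 : p = q
    · subst h2
      show pvCnts (some p) cnt (p :: S) = _
      rw [show pvDed p (p :: S) = pvDed p S from by simp [pvDed]]
      rw [← ih]
      simp [pvCnts]
    · by_cases h1 : p.1 = q.1
      · rw [show pvDed q (p :: S) = p :: pvDed p S from by simp [pvDed, h2]]
        simp [pvCnts, h1, h2, ih]
      · rw [show pvDed q (p :: S) = p :: pvDed p S from by simp [pvDed, h2]]
        simp [pvCnts, h1, ih]

theorem pv_ded_mem (S : List (Int × Int)) (q x : Int × Int) :
    x ∈ q :: pvDed q S ↔ x ∈ q :: S := by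
  induction S generalizing q with
  | nil => rfl
  | cons p S ih =>
    by_cases h : p = q
    · subst h
      rw [show pvDed p (p :: S) = pvDed p S from by simp [pvDed]]
      rw [ih]
      simp
    · rw [show pvDed q (p :: S) = p :: pvDed p S from by simp [pvDed, h]]
      constructor
      · intro hx
        rcases List.mem_cons.1 hx with rfl | hx
        · simp
        · have := (ih p).1 hx
          simp at this ⊢
          tauto
      · intro hx
        rcases List.mem_cons.1 hx with rfl | hx
        · simp
        · have := (ih p).2 hx
          simp at this ⊢
          tauto

theorem pv_lexle_lt (a b : Int × Int) (h : pvLexLe a b) (hne : a ≠ b) : pvLexLtP a b := by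
  rcases a with ⟨a1, a2⟩; rcases b with ⟨b1, b2⟩
  simp [pvLexLe] at h
  simp [pvLexLtP]
  simp [Prod.ext_iff] at hne
  omega

theorem pv_lexlt_trans (a b c : Int × Int) (h1 : pvLexLtP a b) (h2 : pvLexLtP b c) :
    pvLexLtP a c := by
  simp [pvLexLtP] at *; omega

theorem pv_ded_pairwise (S : List (Int × Int)) (q : Int × Int)
    (h : (q :: S).Pairwise pvLexLe) : (q :: pvDed q S).Pairwise pvLexLtP := by
  induction S generalizing q with
  | nil => simp [pvDed]
  | cons p S ih =>
    rw [List.pairwise_cons] at h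
    obtain ⟨hq, hps⟩ := h
    by_cases hpq : p = q
    · subst hpq
      rw [show pvDed p (p :: S) = pvDed p S from by simp [pvDed]]
      exact ih p hps
    · rw [show pvDed q (p :: S) = p :: pvDed p S from by simp [pvDed, hpq]]
      have hrec := ih p hps
      refine List.pairwise_cons.2 ⟨?_, hrec⟩
      intro z hz
      rcases List.mem_cons.1 hz with rfl | hz
      · exact pv_lexle_lt q z (hq z (by simp)) (fun he => hpq he.symm)
      · have hqp : pvLexLtP q p := pv_lexle_lt q p (hq p (by simp)) (fun he => hpq he.symm)
        have hpz : pvLexLtP p z := (List.pairwise_cons.1 hrec).1 z hz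
        exact pv_lexlt_trans q p z hqp hpz

theorem pv_cnts_strict (S : List (Int × Int)) (q : Int × Int) (cnt : Int)
    (h : (q :: S).Pairwise pvLexLtP) :
    pvCnts (some q) cnt S
      = (cnt + ((S.map Prod.fst).count q.1 : Int)) ::
          pvTally ((S.map Prod.fst).filter (fun v => v ≠ q.1)) := by
  induction S generalizing q cnt with
  | nil => simp [pvCnts, pvTally]
  | cons p S ih =>
    rw [List.pairwise_cons] at h
    obtain ⟨hq, hps⟩ := h
    have hpq : p ≠ q := by
      have := hq p (by simp)
      rcases this with h' | ⟨h1, h2⟩ <;> (intro he; subst he; omega)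
    by_cases h1 : p.1 = q.1
    · show pvCnts (some q) cnt (p :: S) = _
      rw [show pvCnts (some q) cnt (p :: S) = pvCnts (some p) (cnt + 1) S from by
        simp [pvCnts, h1, hpq]]
      rw [ih p (cnt + 1) hps]
      have hcnt : List.count q.1 ((p :: S).map Prod.fst) = List.count p.1 (S.map Prod.fst) + 1 := by
        simp [h1]
      have hfil : ((p :: S).map Prod.fst).filter (fun v => v ≠ q.1)
          = (S.map Prod.fst).filter (fun v => v ≠ p.1) := by
        simp [h1]
      rw [hcnt, hfil, h1]
      congr 1
      push_cast
      ring
    · show pvCnts (some q) cnt (p :: S) = _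
      rw [show pvCnts (some q) cnt (p :: S) = cnt :: pvCnts (some p) 1 S from by
        simp [pvCnts, h1]]
      rw [ih p 1 hps]
      have hzero : ∀ z ∈ S.map Prod.fst, q.1 ≠ z ∧ z ≠ q.1 := by
        intro z hz
        obtain ⟨w, hw, rfl⟩ := List.mem_map.1 hz
        have hqp : q.1 < p.1 := by
          have := hq p (by simp)
          rcases this with h' | ⟨he, _⟩
          · exact h'
          · exact absurd he.symm h1
        have hpw : p.1 ≤ w.1 := by
          have := (List.pairwise_cons.1 hps).1 w hw
          rcases this with h' | ⟨he, _⟩ <;> omega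
        constructor <;> omega
      have hcnt : List.count q.1 ((p :: S).map Prod.fst) = 0 := by
        rw [List.count_eq_zero]
        intro hmem
        rcases List.mem_cons.1 hmem with he | hmem
        · exact h1 he.symm
        · exact (hzero _ hmem).1 rfl
      have hfil : ((p :: S).map Prod.fst).filter (fun v => v ≠ q.1) = p.1 :: S.map Prod.fst := by
        rw [List.map_cons, List.filter_cons]
        have hd : (decide (p.1 ≠ q.1)) = true := by simpa using h1
        rw [if_pos hd, List.filter_eq_self.2]
        intro z hz
        simpa using (hzero z hz).2
      rw [hcnt, hfil]
      show _ = (cnt + (0:Int)) :: pvTally (p.1 :: S.map Prod.fst)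
      rw [show pvTally (p.1 :: S.map Prod.fst)
          = (1 + ((S.map Prod.fst).count p.1 : Int)) ::
              pvTally ((S.map Prod.fst).filter (fun v => v ≠ p.1)) from by rw [pvTally]]
      norm_num

theorem pv_nod_mem (G : List Int) (x : Int) : x ∈ pvNod G ↔ x ∈ G := by
  induction hn : G.length using Nat.strong_induction_on generalizing G with
  | _ n ih =>
  cases G with
  | nil => simp [pvNod]
  | cons a G =>
    rw [pvNod]
    have hlen : (G.filter (fun v => v ≠ a)).length < n := by
      rw [← hn]
      simp only [List.length_cons, Nat.lt_succ_iff]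
      exact List.length_filter_le _ _
    simp only [List.mem_cons, ih _ hlen _ rfl, List.mem_filter]
    by_cases hx : x = a <;> simp [hx]

theorem pv_nod_nodup (G : List Int) : (pvNod G).Nodup := by
  induction hn : G.length using Nat.strong_induction_on generalizing G with
  | _ n ih =>
  cases G with
  | nil => simp [pvNod]
  | cons a G =>
    rw [pvNod]
    have hlen : (G.filter (fun v => v ≠ a)).length < n := by
      rw [← hn]
      simp only [List.length_cons, Nat.lt_succ_iff]
      exact List.length_filter_le _ _
    refine List.nodup_cons.2 ⟨?_, ih _ hlen _ rfl⟩
    intro hmem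
    have := (pv_nod_mem _ a).1 hmem
    simp at this

theorem pv_tally_eq_map (G : List Int) :
    pvTally G = (pvNod G).map (fun v => (G.count v : Int)) := by
  induction hn : G.length using Nat.strong_induction_on generalizing G with
  | _ n ih =>
  cases G with
  | nil => simp [pvTally, pvNod]
  | cons a G =>
    rw [pvTally, pvNod]
    have hlen : (G.filter (fun v => v ≠ a)).length < n := by
      rw [← hn]
      simp only [List.length_cons, Nat.lt_succ_iff]
      exact List.length_filter_le _ _
    rw [List.map_cons]
    congr 1
    · rw [List.count_cons_self]
      push_cast
      ring
    · rw [ih _ hlen _ rfl]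
      apply List.map_congr_left
      intro v hv
      have hvf : v ∈ G.filter (fun v => v ≠ a) := (pv_nod_mem _ v).1 hv
      have hvne : v ≠ a := by
        have := (List.mem_filter.1 hvf).2
        simpa using this
      rw [List.count_filter (by simpa using hvne)]
      simp [List.count_cons]
      exact fun h => hvne h.symm

-- ---- assembling the two sides ----

-- abbreviation used only in the proofs below: the (user, minute) pair of one entry
def pvPair (e : List Int) : Int × Int := (PySem.List.pyGetD e 0 0, PySem.List.pyGetD e 1 0)

-- strict lexicographic order separates its arguments
theorem pv_lexltP_ne (a b : Int × Int) (h : pvLexLtP a b) : a ≠ b := by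
  rcases a with ⟨a1, a2⟩; rcases b with ⟨b1, b2⟩
  simp [pvLexLtP] at h
  simp [Prod.ext_iff]
  omega

-- A's result as a fold of pvIncr over the per-user multiplicities of the distinct pairs
theorem pv_A_eq (logs : List (List Int)) (k : Int) :
    findUAM logs k
      = ((PySem.Set.ofList ((PySem.Set.ofList (logs.map pvPair)).map Prod.fst)).map
          (fun u => (List.count u ((PySem.Set.ofList (logs.map pvPair)).map Prod.fst) : Int))).foldl
          pvIncr (List.replicate k.toNat 0) := by
  have hfold : logs.foldl pvAddPair PySem.Set.empty = PySem.Set.ofList (logs.map pvPair) := by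
    rw [PySem.Set.ofList_eq_foldl, List.foldl_map]
    rfl
  obtain ⟨hk, hg⟩ := pv_inv logs PySem.Dict.empty PySem.Set.empty
    (by simp [PySem.Dict.keys_empty, PySem.Set.empty, PySem.Set.ofList])
    (by intro u; simp [PySem.Dict.getD_empty, PySem.Set.empty])
  rw [hfold] at hk hg
  show ((logs.foldl pvStepA PySem.Dict.empty).keys.foldl (fun r u =>
      r.set ((((logs.foldl pvStepA PySem.Dict.empty).getD u []).length : Int) - 1).toNat
        (r.getD ((((logs.foldl pvStepA PySem.Dict.empty).getD u []).length : Int) - 1).toNat 0 + 1))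
      ((PySem.List.pyRange 0 k 1).map (fun _ => (0 : Int)))) = _
  rw [hk, pv_init]
  conv_rhs => rw [List.foldl_map]
  apply PySem.List.foldl_congr_mem
  intro r u hu
  show pvIncr r _ = pvIncr r _
  rw [hg u, pv_count]

-- B's result as a fold of pvIncr over the flushed counts of the sorted scan
theorem pv_B_eq (logs : List (List Int)) (k : Int) :
    findUAM_alt logs k
      = (pvCnts none 0 (PySem.List.sorted2 (logs.map pvPair) (fun p => p.1) (fun p => p.2))).foldl
          pvIncr (List.replicate k.toNat 0) := by
  exact pv_scan_eq_foldl _ _ _ _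

-- ===== VERDICT (by name: the statement is the Claim_ definition above) =====
theorem findUAM_spec : Claim_equal_findUAM := by
  intro logs k _ _
  show findUAM logs k = findUAM_alt logs k
  rw [pv_A_eq, pv_B_eq]
  cases hS : PySem.List.sorted2 (logs.map pvPair) (fun p => p.1) (fun p => p.2) with
  | nil =>
    have hP : logs.map pvPair = [] := by
      have hperm := PySem.List.sorted2_perm (logs.map pvPair) (fun p => p.1) (fun p => p.2) false
      rw [hS] at hperm
      exact hperm.symm.eq_nil
    rw [hP]
    simp [pvCnts, PySem.Set.ofList]
  | cons p s =>
    have hPW : (p :: s).Pairwise pvLexLe := by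
      have := pv_sorted2_pairwise (logs.map pvPair)
      rwa [hS] at this
    have hcnts : pvCnts none 0 (p :: s) = pvTally ((p :: pvDed p s).map Prod.fst) := by
      have h1 : pvCnts none 0 (p :: s) = pvCnts (some p) (0 + 1) s := rfl
      have hstrict := pv_ded_pairwise s p hPW
      rw [h1, show (0 : Int) + 1 = 1 from by norm_num, pv_cnts_ded,
        pv_cnts_strict (pvDed p s) p 1 hstrict, List.map_cons, pvTally]
    rw [hcnts, pv_tally_eq_map]
    have hDnodup : (p :: pvDed p s).Nodup :=
      List.Pairwise.imp (fun h => pv_lexltP_ne _ _ h) (pv_ded_pairwise s p hPW)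
    have hDmem : ∀ x, x ∈ p :: pvDed p s ↔ x ∈ logs.map pvPair := by
      intro x
      rw [pv_ded_mem]
      have hperm := PySem.List.sorted2_perm (logs.map pvPair) (fun p => p.1) (fun p => p.2) false
      rw [hS] at hperm
      exact hperm.mem_iff
    have hPerm : (PySem.Set.ofList (logs.map pvPair)).Perm (p :: pvDed p s) :=
      (List.perm_ext_iff_of_nodup (PySem.Set.nodup_ofList _) hDnodup).2
        (fun x => by rw [PySem.Set.mem_ofList, hDmem])
    have hFperm : ((PySem.Set.ofList (logs.map pvPair)).map Prod.fst).Perm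
        ((p :: pvDed p s).map Prod.fst) := hPerm.map _
    have hUperm : (PySem.Set.ofList ((PySem.Set.ofList (logs.map pvPair)).map Prod.fst)).Perm
        (pvNod ((p :: pvDed p s).map Prod.fst)) :=
      (List.perm_ext_iff_of_nodup (PySem.Set.nodup_ofList _) (pv_nod_nodup _)).2
        (fun x => by rw [PySem.Set.mem_ofList, pv_nod_mem, hFperm.mem_iff])
    haveI : RightCommutative pvIncr := ⟨pv_incr_comm⟩
    have hmap : ((PySem.Set.ofList ((PySem.Set.ofList (logs.map pvPair)).map Prod.fst)).map
          (fun u => (List.count u ((PySem.Set.ofList (logs.map pvPair)).map Prod.fst) : Int))).Perm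
        ((pvNod ((p :: pvDed p s).map Prod.fst)).map
          (fun u => (List.count u ((p :: pvDed p s).map Prod.fst) : Int))) := by
      have h1 := hUperm.map
        (fun u => (List.count u ((PySem.Set.ofList (logs.map pvPair)).map Prod.fst) : Int))
      have h2 : (pvNod ((p :: pvDed p s).map Prod.fst)).map
            (fun u => (List.count u ((PySem.Set.ofList (logs.map pvPair)).map Prod.fst) : Int))
          = (pvNod ((p :: pvDed p s).map Prod.fst)).map
            (fun u => (List.count u ((p :: pvDed p s).map Prod.fst) : Int)) :=
        List.map_congr_left (fun v _ => by rw [hFperm.count_eq])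
      rw [h2] at h1
      exact h1
    exact hmap.foldl_eq _
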